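-- pv_equiv track=rewrite | github.com/Flexksx/Formal-Languages-Labs | Regex/main.py | parse_regex
-- ===== SOURCE A (Python) =====
-- def parse_regex(regex):
--     operators = ['+', '*', '?', '^']  # List of operators
--     parentheses_stack = []
--     parts = []
--
--     current_part = ''
--
--     for char in regex:
--         if char == '(':
--             if current_part:
--                 parts.append(current_part)
--                 current_part = ''
--             parentheses_stack.append(len(parts))
--         elif char == ')':
--             if current_part:
--                 parts.append(current_part)
--                 current_part = ''
--             start = parentheses_stack.pop()
--             parts[start:] = [''.join(parts[start:])]
--         elif char in operators:
--             if current_part: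
--                 parts.append(current_part)
--                 current_part = ''
--             parts.append(char)
--         else:
--             current_part += char
--
--     if current_part:
--         parts.append(current_part)
--
--     return parts
-- ===== SOURCE B (Python) =====
-- def parse_regex(regex):
--     # Single reverse pass with a nesting-depth counter: group contents are
--     # accumulated in one buffer and emitted when the matching '(' is reached,
--     # instead of re-slicing the parts list at every ')'.
--     operators = ('+', '*', '?', '^')
--     parts = []   # collected parts, right-to-left
--     buf = []     # pending characters (in right-to-left order)
--     depth = 0    # current ')'-nesting depth
--     for char in reversed(regex):
--         if char == ')':
--             if depth == 0 and buf:
--                 parts.append(''.join(reversed(buf)))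
--                 buf = []
--             depth += 1
--         elif char == '(':
--             if depth > 0:
--                 depth -= 1
--                 if depth == 0:
--                     parts.append(''.join(reversed(buf)))
--                     buf = []
--             elif buf:  # unmatched '(' merely splits at depth 0
--                 parts.append(''.join(reversed(buf)))
--                 buf = []
--         elif depth == 0 and char in operators:
--             if buf:
--                 parts.append(''.join(reversed(buf)))
--                 buf = []
--             parts.append(char)
--         else:
--             buf.append(char)
--     if buf:
--         parts.append(''.join(reversed(buf)))
--     parts.reverse()
--     return parts
-- ===== Notes on version B (the rewrite author's own statement) =====
-- stated objective: alternative
-- what changed: A keeps a stack of part indices and re-slices/re-joins the parts list at every ')'; B is a single reverse pass with one nesting-depth counter and one character buffer, emitting each parenthesized group once when its opening '(' is reached (an unmatched '(' is recognised at depth 0 for free).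
import Mathlib
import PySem

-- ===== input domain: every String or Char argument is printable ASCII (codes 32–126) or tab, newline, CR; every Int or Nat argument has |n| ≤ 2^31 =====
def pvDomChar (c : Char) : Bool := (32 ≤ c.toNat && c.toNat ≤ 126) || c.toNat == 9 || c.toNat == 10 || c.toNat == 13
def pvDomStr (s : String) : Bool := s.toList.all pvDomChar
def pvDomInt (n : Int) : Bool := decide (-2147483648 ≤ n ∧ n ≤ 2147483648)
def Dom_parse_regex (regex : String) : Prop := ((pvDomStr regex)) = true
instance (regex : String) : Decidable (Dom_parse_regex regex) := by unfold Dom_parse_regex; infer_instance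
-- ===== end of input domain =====

-- B replaces A's forward scan with stack + repeated list-slice regrouping by a single
-- reverse pass with a depth counter and one buffer (same return value on Pre_).

-- ===== PORT A =====
-- Literal port of A. Strings are carried as List Char (String.mk at the end); the
-- parts list is kept in Python order (append = ++ [x]); the stack is top-first.
-- On ')' with an empty stack Python raises IndexError (list.pop from empty);
-- that input is excluded by Pre_parse_regex, the port returns [] there.
def pvALoop : List Char → List Nat → List (List Char) → List Char → List (List Char)
  | [], _, parts, cur => if cur.isEmpty then parts else parts ++ [cur]
  | c :: cs, stk, parts, cur =>
    if c = '(' then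
      let parts := if cur.isEmpty then parts else parts ++ [cur]
      pvALoop cs (parts.length :: stk) parts []
    else if c = ')' then
      let parts := if cur.isEmpty then parts else parts ++ [cur]
      match stk with
      | [] => []  -- IndexError in Python; outside Pre_parse_regex
      | t :: stk' => pvALoop cs stk' (parts.take t ++ [(parts.drop t).flatten]) []
    else if c ∈ ['+', '*', '?', '^'] then
      let parts := if cur.isEmpty then parts else parts ++ [cur]
      pvALoop cs stk (parts ++ [[c]]) []
    else
      pvALoop cs stk parts (cur ++ [c])

def parse_regex (regex : String) : List String :=
  (pvALoop regex.toList [] [] []).map String.mk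

-- ===== PORT B =====
-- Literal port of Source B. Source B appends parts right-to-left and reverses at the end,
-- and keeps buf in right-to-left order (reversed when joined); the port represents
-- both directly in final (left-to-right) order, so append-then-reverse becomes cons.
def pvBLoop : List Char → List (List Char) → List Char → Nat → List (List Char)
  | [], parts, buf, _ => if buf.isEmpty then parts else buf :: parts
  | c :: cs, parts, buf, depth =>
    if c = ')' then
      if depth = 0 ∧ ¬ buf.isEmpty then pvBLoop cs (buf :: parts) [] 1
      else pvBLoop cs parts buf (depth + 1)
    else if c = '(' then
      if 0 < depth then
        if depth = 1 then pvBLoop cs (buf :: parts) [] 0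
        else pvBLoop cs parts buf (depth - 1)
      else if buf.isEmpty then pvBLoop cs parts [] 0
      else pvBLoop cs (buf :: parts) [] 0
    else if depth = 0 ∧ c ∈ ['+', '*', '?', '^'] then
      pvBLoop cs ([c] :: (if buf.isEmpty then parts else buf :: parts)) [] 0
    else
      pvBLoop cs parts (c :: buf) depth

def parse_regex_alt (regex : String) : List String :=
  (pvBLoop regex.toList.reverse [] [] 0).map String.mk

-- ===== PRECONDITION & SPEC =====
-- Pre_ excludes exactly the inputs where A raises IndexError: a prefix with more ')' than '('.
def Pre_parse_regex (regex : String) : Prop :=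
  ∀ p ∈ regex.toList.inits, p.count ')' ≤ p.count '('
instance (regex : String) : Decidable (Pre_parse_regex regex) := by unfold Pre_parse_regex; infer_instance

def pvWitness_parse_regex : String := "(ab)+c(d(e)*f"

def Spec_parse_regex (regex : String) (out : List String) : Prop := out = parse_regex_alt regex
instance (regex : String) (out : List String) : Decidable (Spec_parse_regex regex out) := by unfold Spec_parse_regex; infer_instance

-- ===== CLAIM (what is proved, stated in full; the proofs are below) =====
def Claim_equal_parse_regex : Prop := ∀ (regex : String), Dom_parse_regex regex → Pre_parse_regex regex → Spec_parse_regex regex (parse_regex regex)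
-- ===== LEMMAS AND PROOFS =====

-- One step of B's reverse scan, as a function of the character (mirrors pvBLoop's branches).
def pvBStep (c : Char) (st : List (List Char) × List Char × Nat) :
    List (List Char) × List Char × Nat :=
  if c = ')' then
    if st.2.2 = 0 ∧ ¬ st.2.1.isEmpty then (st.2.1 :: st.1, [], 1)
    else (st.1, st.2.1, st.2.2 + 1)
  else if c = '(' then
    if 0 < st.2.2 then
      if st.2.2 = 1 then (st.2.1 :: st.1, [], 0)
      else (st.1, st.2.1, st.2.2 - 1)
    else if st.2.1.isEmpty then (st.1, [], 0)
    else (st.2.1 :: st.1, [], 0)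
  else if st.2.2 = 0 ∧ c ∈ ['+', '*', '?', '^'] then
    (([c] :: (if st.2.1.isEmpty then st.1 else st.2.1 :: st.1)), [], 0)
  else
    (st.1, c :: st.2.1, st.2.2)

-- B's scan state after (conceptually) reverse-scanning the suffix s.
def pvBScan (s : List Char) : List (List Char) × List Char × Nat :=
  List.foldr pvBStep ([], [], 0) s

def pvFinB (st : List (List Char) × List Char × Nat) : List (List Char) :=
  if st.2.1.isEmpty then st.1 else st.2.1 :: st.1

def pvOptF (x : List Char) : List (List Char) := if x.isEmpty then [] else [x]

lemma pvBLoop_foldl : ∀ (l : List Char) (parts : List (List Char)) (buf : List Char) (d : Nat),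
    pvBLoop l parts buf d = pvFinB (List.foldl (fun st c => pvBStep c st) (parts, buf, d) l) := by
  intro l
  induction l with
  | nil => intro parts buf d; simp [pvBLoop, pvFinB]
  | cons c cs ih =>
    intro parts buf d
    simp only [pvBLoop, List.foldl, pvBStep]
    split_ifs <;> apply ih

lemma parse_regex_alt_scan (regex : String) :
    parse_regex_alt regex = (pvFinB (pvBScan regex.toList)).map String.mk := by
  rw [parse_regex_alt, pvBLoop_foldl, pvBScan, List.foldl_reverse]

-- depth after scanning suffix s, as a recurrence
lemma pvBScan_depth : ∀ (c : Char) (cs : List Char),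
    (pvBScan (c :: cs)).2.2 =
      (if c = ')' then (pvBScan cs).2.2 + 1
       else if c = '(' then (pvBScan cs).2.2 - 1 else (pvBScan cs).2.2) := by
  intro c cs
  show (pvBStep c (pvBScan cs)).2.2 = _
  simp only [pvBStep]
  split_ifs <;> simp_all

-- Pre_ bound, generalized for induction
lemma pre_depth_le : ∀ (s : List Char) (n : Nat),
    (∀ p ∈ s.inits, p.count ')' ≤ p.count '(' + n) → (pvBScan s).2.2 ≤ n := by
  intro s
  induction s with
  | nil => intro n _; simp [pvBScan]
  | cons c cs ih =>
    intro n h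
    have hrec := pvBScan_depth c cs
    have h1 := h [c] (by rw [List.mem_inits]; exact ⟨cs, rfl⟩)
    have hc : ∀ p ∈ cs.inits, p.count ')' ≤ p.count '(' +
        (if c = ')' then n - 1 else if c = '(' then n + 1 else n) := by
      intro p hp
      have hcp := h (c :: p) (by
        rw [List.mem_inits] at hp ⊢
        obtain ⟨t, rfl⟩ := hp
        exact ⟨t, rfl⟩)
      split_ifs with e1 e2
      · subst e1; simp at hcp h1; omega
      · subst e2; simp at hcp; omega
      · simp [List.count_cons, e1, e2] at hcp; omega  -- count over cons with a non-paren head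
    have hd := ih _ hc
    split_ifs at hrec hd with e1 e2
    · subst e1; simp at h1; omega
    · omega
    · omega

-- small facts about take/drop/flatten and pvOptF
lemma optF_flatten (cur : List Char) : (pvOptF cur).flatten = cur := by
  cases cur <;> simp [pvOptF]

lemma take_optF (parts : List (List Char)) (cur : List Char) (t : Nat) (h : t ≤ parts.length) :
    (parts ++ pvOptF cur).take t = parts.take t := List.take_append_of_le_length h

lemma drop_optF_flatten (parts : List (List Char)) (cur : List Char) (t : Nat)
    (h : t ≤ parts.length) :
    ((parts ++ pvOptF cur).drop t).flatten = (parts.drop t).flatten ++ cur := by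
  rw [List.drop_append_of_le_length h, List.flatten_append, optF_flatten]

lemma flatten_split (l : List (List Char)) (t' t₁ : Nat) (h1 : t' ≤ t₁) (h2 : t' ≤ l.length) :
    ((l.take t₁).drop t').flatten ++ (l.drop t₁).flatten = (l.drop t').flatten := by
  conv_rhs => rw [← List.take_append_drop t₁ l]
  rw [List.drop_append_of_le_length (by simp; omega), List.flatten_append]

lemma getD_mem (l : List Nat) (i : Nat) (h : i < l.length) : l.getD i 0 ∈ l := by
  rw [List.getD_eq_getElem _ _ h]; exact List.getElem_mem h

-- evaluation lemmas for one B-step on a destructured state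
lemma bstep_close (st : List (List Char) × List Char × Nat) :
    pvBStep ')' st = if st.2.2 = 0 ∧ ¬ st.2.1.isEmpty then (st.2.1 :: st.1, [], 1)
      else (st.1, st.2.1, st.2.2 + 1) := by
  simp [pvBStep]

lemma bstep_open (st : List (List Char) × List Char × Nat) :
    pvBStep '(' st = if 0 < st.2.2 then
        (if st.2.2 = 1 then (st.2.1 :: st.1, [], 0) else (st.1, st.2.1, st.2.2 - 1))
      else if st.2.1.isEmpty then (st.1, [], 0) else (st.2.1 :: st.1, [], 0) := by
  simp [pvBStep]

lemma bstep_op (c : Char) (hc : c ∈ ['+', '*', '?', '^'])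
    (st : List (List Char) × List Char × Nat) :
    pvBStep c st = if st.2.2 = 0 then
        (([c] :: (if st.2.1.isEmpty then st.1 else st.2.1 :: st.1)), [], 0)
      else (st.1, c :: st.2.1, st.2.2) := by
  have h1 : ¬ c = ')' := by rintro rfl; simp at hc
  have h2 : ¬ c = '(' := by rintro rfl; simp at hc
  simp [pvBStep, h1, h2, hc]

lemma bstep_other (c : Char) (h1 : ¬ c = '(') (h2 : ¬ c = ')') (h3 : ¬ c ∈ ['+', '*', '?', '^'])
    (st : List (List Char) × List Char × Nat) :
    pvBStep c st = (st.1, c :: st.2.1, st.2.2) := by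
  simp [pvBStep, h1, h2, h3]

-- The master invariant: A's loop from any well-formed state, described by B's scan of the suffix.
lemma master : ∀ (s : List Char) (stk : List Nat) (parts : List (List Char)) (cur : List Char),
    (pvBScan s).2.2 ≤ stk.length →
    stk.Pairwise (fun a b => b ≤ a) →
    (∀ t ∈ stk, t ≤ parts.length) →
    pvALoop s stk parts cur =
      (if (pvBScan s).2.2 = 0 then
        parts ++ pvOptF (cur ++ (pvBScan s).2.1) ++ (pvBScan s).1
      else
        (parts.take (stk.getD ((pvBScan s).2.2 - 1) 0)) ++
          [(parts.drop (stk.getD ((pvBScan s).2.2 - 1) 0)).flatten ++ cur ++ (pvBScan s).2.1] ++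
          (pvBScan s).1) := by
  intro s
  induction s with
  | nil =>
    intro stk parts cur _ _ _
    cases cur <;> simp [pvALoop, pvBScan, pvOptF]
  | cons c cs ih =>
    intro stk parts cur h1 h2 h3
    have hcons : pvBScan (c :: cs) = pvBStep c (pvBScan cs) := rfl
    rcases hst : pvBScan cs with ⟨bp, bf, d⟩
    rw [hcons, hst] at h1 ⊢
    by_cases hc1 : c = '('
    · -- '(' : flush cur, push parts.length
      subst hc1
      rw [bstep_open] at h1 ⊢
      rw [show pvALoop ('(' :: cs) stk parts cur =
            pvALoop cs ((parts ++ pvOptF cur).length :: stk) (parts ++ pvOptF cur) [] by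
          cases cur <;> simp [pvALoop, pvOptF]]
      have hlen : parts.length ≤ (parts ++ pvOptF cur).length := by simp
      have hb : ∀ t ∈ (parts ++ pvOptF cur).length :: stk, t ≤ (parts ++ pvOptF cur).length := by
        intro t ht
        rcases List.mem_cons.1 ht with h | h
        · omega
        · exact le_trans (h3 t h) hlen
      have hp : ((parts ++ pvOptF cur).length :: stk).Pairwise (fun a b => b ≤ a) :=
        List.Pairwise.cons (fun t ht => le_trans (h3 t ht) hlen) h2
      have key := ih ((parts ++ pvOptF cur).length :: stk) (parts ++ pvOptF cur) []
      rw [hst] at key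
      match d with
      | 0 =>
        have := key (by simp) hp hb
        simp only at this
        rw [this]
        simp only [show ¬ (0 : Nat) < 0 by omega, if_neg, if_false, reduceIte]
        by_cases hbf : bf.isEmpty <;>
          cases bf <;> simp_all [pvOptF]
      | 1 =>
        have := key (by simp) hp hb
        simp only at this
        rw [this]
        simp only [show (0:Nat) < 1 by omega, if_pos, if_true, reduceIte]
        cases cur <;> simp [pvOptF, List.take_append]
      | (e+2) =>
        simp only [show (0:Nat) < e + 2 by omega, if_pos, if_true,
          show ¬ e + 2 = 1 by omega, if_neg, reduceIte] at h1 ⊢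
        have := key (by simp; omega) hp hb
        simp only at this
        rw [this]
        have he : e < stk.length := by simp at h1; omega
        have htle : stk.getD e 0 ≤ parts.length := h3 _ (getD_mem stk e he)
        simp only [show ¬ e + 2 = 0 by omega, if_neg, show ¬ e + 2 - 1 = 0 by omega,
          show e + 2 - 1 = e + 1 by omega, show e + 2 - 1 - 1 = e by omega, reduceIte,
          List.getD_cons_succ]
        rw [take_optF _ _ _ htle, drop_optF_flatten _ _ _ htle]
        simp
    · by_cases hc2 : c = ')'
      · -- ')' : flush cur, pop, regroup
        subst hc2
        rw [bstep_close] at h1 ⊢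
        have hd1 : 1 ≤ stk.length := by
          split_ifs at h1 <;> simp at h1 <;> omega
        rcases stk with _ | ⟨t₁, stk'⟩
        · simp at hd1
        have ht₁ : t₁ ≤ parts.length := h3 t₁ (by simp)
        have hstk' : ∀ t ∈ stk', t ≤ t₁ := (List.pairwise_cons.1 h2).1
        have hp' : stk'.Pairwise (fun a b => b ≤ a) := (List.pairwise_cons.1 h2).2
        rw [show pvALoop (')' :: cs) (t₁ :: stk') parts cur =
              pvALoop cs stk' (((parts ++ pvOptF cur).take t₁) ++
                [((parts ++ pvOptF cur).drop t₁).flatten]) [] by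
            cases cur <;> simp [pvALoop, pvOptF]]
        have hb' : ∀ t ∈ stk', t ≤ (((parts ++ pvOptF cur).take t₁) ++
            [((parts ++ pvOptF cur).drop t₁).flatten]).length := by
          intro t ht; have h := hstk' t ht
          simp [List.length_take]
          omega
        have hdep : d ≤ stk'.length := by
          split_ifs at h1 with hx
          · obtain ⟨rfl, -⟩ := hx; omega
          · simp at h1; omega
        have key := ih stk' (((parts ++ pvOptF cur).take t₁) ++
            [((parts ++ pvOptF cur).drop t₁).flatten]) []
        rw [hst] at key
        have := key (by simpa using hdep) hp' hb'
        simp only at this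
        rw [this]
        rw [take_optF _ _ _ ht₁, drop_optF_flatten _ _ _ ht₁]
        by_cases hsp : d = 0 ∧ ¬ bf.isEmpty
        · rw [if_pos hsp]
          rcases hsp with ⟨rfl, hbf⟩
          simp only [reduceIte, List.getD_cons_zero]
          cases bf <;> simp_all [pvOptF]
        · rw [if_neg hsp]
          match d with
          | 0 =>
            have hbf : bf.isEmpty := by
              by_contra hx; exact hsp ⟨rfl, hx⟩
            simp only [reduceIte, List.getD_cons_zero]
            cases bf <;> simp_all [pvOptF]
          | (e+1) =>
            have he : e < stk'.length := by omega
            have htm : stk'.getD e 0 ∈ stk' := getD_mem stk' e he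
            have htle1 : stk'.getD e 0 ≤ t₁ := hstk' _ htm
            have htle : stk'.getD e 0 ≤ parts.length := le_trans htle1 ht₁
            simp only [show ¬ e + 1 = 0 by omega, if_neg,
              show ¬ e + 1 + 1 = 0 by omega, reduceIte, List.getD_cons_succ,
              show e + 1 - 1 = e by omega, show e + 1 + 1 - 1 = e + 1 by omega]
            rw [List.take_append_of_le_length (by simp only [List.length_append, List.length_take, List.length_cons, List.length_nil]; omega),
              List.take_take, min_eq_left htle1,
              List.drop_append_of_le_length (by simp only [List.length_append, List.length_take, List.length_cons, List.length_nil]; omega),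
              List.flatten_append]
            have hfs := flatten_split parts (stk'.getD e 0) t₁ htle1 htle
            rw [← hfs]
            simp
      · -- operator or plain character
        by_cases hc3 : c ∈ ['+', '*', '?', '^']
        · -- operator: flush cur, append [c]
          rw [bstep_op c hc3] at h1 ⊢
          rw [show pvALoop (c :: cs) stk parts cur =
                pvALoop cs stk ((parts ++ pvOptF cur) ++ [[c]]) [] by
              cases cur <;> simp [pvALoop, pvOptF, hc1, hc2, hc3]]
          have hb : ∀ t ∈ stk, t ≤ ((parts ++ pvOptF cur) ++ [[c]]).length := by
            intro t ht; have := h3 t ht; simp; omega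
          have key := ih stk ((parts ++ pvOptF cur) ++ [[c]]) []
          rw [hst] at key
          match d with
          | 0 =>
            simp only [reduceIte]
            have := key (by simp) h2 hb
            simp only at this
            rw [this]
            cases bf <;> simp [pvOptF]
          | (e+1) =>
            simp only [show ¬ e + 1 = 0 by omega, if_neg, reduceIte] at h1 ⊢
            have := key (by simpa using h1) h2 hb
            simp only at this
            rw [this]
            have he : e < stk.length := by simp at h1; omega
            have htle : stk.getD e 0 ≤ parts.length := h3 _ (getD_mem stk e he)
            simp only [show e + 1 - 1 = e by omega]
            rw [show (parts ++ pvOptF cur) ++ [[c]] = parts ++ (pvOptF cur ++ [[c]]) by simp,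
              List.take_append_of_le_length htle,
              List.drop_append_of_le_length htle, List.flatten_append, List.flatten_append,
              optF_flatten]
            simp
        · -- plain character: cur := cur ++ [c]
          rw [bstep_other c hc1 hc2 hc3] at h1 ⊢
          rw [show pvALoop (c :: cs) stk parts cur = pvALoop cs stk parts (cur ++ [c]) by
              simp [pvALoop, hc1, hc2, hc3]]
          have key := ih stk parts (cur ++ [c])
          rw [hst] at key
          have := key (by simpa using h1) h2 h3
          simp only at this
          rw [this]
          by_cases hd : d = 0
          · subst hd; simp
          · simp only [if_neg hd]
            simp

-- ===== VERDICT (by name: the statement is the Claim_ definition above) =====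
theorem parse_regex_spec : Claim_equal_parse_regex := by
  intro regex _ hpre
  show parse_regex regex = parse_regex_alt regex
  have hd : (pvBScan regex.toList).2.2 = 0 := by
    have := pre_depth_le regex.toList 0 (by
      intro p hp
      simpa using hpre p hp)
    omega
  have hm := master regex.toList [] [] [] (by omega) List.Pairwise.nil (by simp)
  rw [parse_regex, parse_regex_alt_scan, hm, if_pos hd]
  rcases hst : pvBScan regex.toList with ⟨bp, bf, d⟩
  cases bf <;> simp [pvFinB, pvOptF]
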